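-- pv_equiv track=rewrite | github.com/vin10ah/until-the-end-of-time | 프로그래머스/0/181837. 커피 심부름/커피 심부름.py | solution
-- ===== SOURCE A (Python) =====
-- def solution(order):
--     answer = 0
--     for menu in order:
--         if 'americano' in menu or menu == 'anything':
--             answer += 4500
--         else:
--             answer += 5000
--
--     return answer
-- ===== SOURCE B (Python) =====
-- def solution(order):
--     if not order:
--         return 0
--     if len(order) == 1:
--         m = order[0]
--         return 4500 if 'americano' in m or m == 'anything' else 5000
--     mid = len(order) // 2
--     return solution(order[:mid]) + solution(order[mid:])
-- ===== Notes on version B (the rewrite author's own statement) =====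
-- stated objective: alternative
-- what changed: B replaces A's single left-to-right conditional accumulation with a divide-and-conquer recursion that splits the list in half, sums the two halves recursively, and prices only singleton lists at the base case.
import Mathlib
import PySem

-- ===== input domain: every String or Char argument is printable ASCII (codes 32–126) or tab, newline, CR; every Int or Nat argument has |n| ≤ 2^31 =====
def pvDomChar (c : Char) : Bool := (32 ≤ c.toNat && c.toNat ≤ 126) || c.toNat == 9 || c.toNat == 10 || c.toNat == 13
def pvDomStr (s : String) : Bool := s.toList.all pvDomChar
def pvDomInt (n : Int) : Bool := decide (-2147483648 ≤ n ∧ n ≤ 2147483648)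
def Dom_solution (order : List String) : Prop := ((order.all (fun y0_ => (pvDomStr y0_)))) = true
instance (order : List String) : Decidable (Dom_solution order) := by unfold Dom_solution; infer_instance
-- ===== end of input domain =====

-- B replaces A's left-to-right conditional accumulation with a divide-and-conquer recursion over list halves (alternative decomposition, same cost).

-- ===== PORT A =====
def solution (order : List String) : Int :=
  order.foldl (fun answer menu =>
    if PySem.Str.isIn "americano" menu || menu == "anything" then answer + 4500
    else answer + 5000) 0

-- ===== PORT B =====
def solution_alt (order : List String) : Int :=
  match order with
  | [] => 0
  | m :: rest =>
    if rest.length = 0 then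
      if PySem.Str.isIn "americano" m || m == "anything" then 4500 else 5000
    else
      let mid := (m :: rest).length / 2
      solution_alt (PySem.List.slice (m :: rest) none (some (mid : Int))) +
      solution_alt (PySem.List.slice (m :: rest) (some (mid : Int)) none)
termination_by order.length
decreasing_by
  · rw [PySem.List.slice_to_natCast]; simp [List.length_take]; omega
  · rw [PySem.List.slice_from_natCast]; simp [List.length_drop]; omega

-- ===== PRECONDITION & SPEC =====
def Spec_solution (order : List String) (out : Int) : Prop := out = solution_alt order
instance (order : List String) (out : Int) : Decidable (Spec_solution order out) := by unfold Spec_solution; infer_instance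

-- ===== CLAIM =====
def Claim_equal_solution : Prop := ∀ (order : List String), Dom_solution order → Spec_solution order (solution order)

-- ===== LEMMAS AND PROOFS =====

theorem solution_foldl_shift (order : List String) (a : Int) :
    order.foldl (fun answer menu =>
      if PySem.Str.isIn "americano" menu || menu == "anything" then answer + 4500
      else answer + 5000) a
    = a + solution order := by
  induction order generalizing a with
  | nil => simp [solution]
  | cons h t ih =>
    simp only [solution, List.foldl_cons]
    rw [ih, ih]
    split_ifs <;> ring

theorem solution_append (l1 l2 : List String) :
    solution (l1 ++ l2) = solution l1 + solution l2 := by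
  unfold solution
  rw [List.foldl_append, solution_foldl_shift]
  rfl

theorem alt_eq_solution (order : List String) : solution_alt order = solution order := by
  fun_induction solution_alt order with
  | case1 => simp [solution]
  | case2 m rest hr hc =>
    have : rest = [] := List.length_eq_zero_iff.mp hr
    subst this
    simp only [solution, List.foldl_cons, List.foldl_nil]
    rw [if_pos hc]; norm_num
  | case3 m rest hr hc =>
    have : rest = [] := List.length_eq_zero_iff.mp hr
    subst this
    simp only [solution, List.foldl_cons, List.foldl_nil]
    rw [if_neg hc]; norm_num
  | case4 m rest hr mid ih1 ih2 =>
    rw [ih1, ih2]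
    rw [PySem.List.slice_to_natCast, PySem.List.slice_from_natCast, ← solution_append,
      List.take_append_drop]

-- ===== VERDICT =====
theorem solution_spec : Claim_equal_solution := by
  intro order _
  unfold Spec_solution
  exact (alt_eq_solution order).symm
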